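-- pv_equiv track=rewrite | github.com/moonctp24/For-Algorithm-Code | Python/2021kakao_DevMatching/lotto.py | solution
-- ===== SOURCE A (Python) =====
-- def solution(lottos, win_nums):
--     count = 0
--     count0 = 0
--     for i in lottos:
--         if i == 0: count0+=1
--         for j in win_nums:
--             if i == j: count+=1
--
--     answer = []
--     # hiest rank
--     highest = count+count0
--     if highest < 2: answer.append(6)
--     else: answer.append(6-highest+1)
--
--     # lowest rank
--     if count < 2: answer.append(6)
--     else: answer.append(6-count+1)
--
--     return answer
-- ===== SOURCE B (Python) =====
-- def solution(lottos, win_nums):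
--     # sort-merge join: sort both lists, one two-pointer scan multiplying run lengths
--     a = sorted(lottos)
--     b = sorted(win_nums)
--     count = 0
--     i = j = 0
--     while i < len(a) and j < len(b):
--         if a[i] < b[j]:
--             i += 1
--         elif b[j] < a[i]:
--             j += 1
--         else:
--             v = a[i]
--             i2 = i
--             while i2 < len(a) and a[i2] == v:
--                 i2 += 1
--             j2 = j
--             while j2 < len(b) and b[j2] == v:
--                 j2 += 1
--             count += (i2 - i) * (j2 - j)
--             i, j = i2, j2
--     count0 = lottos.count(0)
--     return [min(7 - count - count0, 6), min(7 - count, 6)]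
-- ===== Notes on version B (the rewrite author's own statement) =====
-- stated objective: faster
-- what changed: Replaces A's nested-loop pair counting by a sort-merge join: both lists are sorted and a single two-pointer scan multiplies the lengths of equal-value runs, and both if/else rank branches become the closed form min(7-c, 6).
import Mathlib
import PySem

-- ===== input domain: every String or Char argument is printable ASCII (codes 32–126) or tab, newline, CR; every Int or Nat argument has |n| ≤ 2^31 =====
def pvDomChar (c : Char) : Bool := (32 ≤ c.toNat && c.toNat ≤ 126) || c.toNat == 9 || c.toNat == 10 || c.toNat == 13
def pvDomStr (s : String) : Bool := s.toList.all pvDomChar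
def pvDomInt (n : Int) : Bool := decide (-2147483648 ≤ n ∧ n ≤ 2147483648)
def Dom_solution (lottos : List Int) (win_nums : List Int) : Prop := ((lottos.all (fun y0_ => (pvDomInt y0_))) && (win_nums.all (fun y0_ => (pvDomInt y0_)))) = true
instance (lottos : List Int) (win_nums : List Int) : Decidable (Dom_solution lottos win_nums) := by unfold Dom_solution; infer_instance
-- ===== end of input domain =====

-- B replaces A's nested-loop pair counting by a sort-merge join (sort both lists, one
-- two-pointer scan multiplying run lengths) and the rank branches by min(7-c,6).

-- ===== PORT A =====
def solution (lottos : List Int) (win_nums : List Int) : List Int :=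
  let st := lottos.foldl (fun (p : Int × Int) i =>
      let p := if i = 0 then (p.1, p.2 + 1) else p
      win_nums.foldl (fun (q : Int × Int) j => if i = j then (q.1 + 1, q.2) else q) p)
    (0, 0)
  let count := st.1
  let count0 := st.2
  let highest := count + count0
  let answer : List Int := if highest < 2 then [6] else [6 - highest + 1]
  let answer := if count < 2 then answer ++ [6] else answer ++ [6 - count + 1]
  answer

-- ===== PORT B =====
-- B's two-pointer while-loop over the two sorted arrays, as structural recursion on
-- the unscanned tails: advance the smaller side; on a match strip both equal-value
-- runs (takeWhile/dropWhile = the two inner run-scanning while-loops) and add the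
-- product of the run lengths.
def pvMergeCount (a b : List Int) : Int :=
  match a, b with
  | [], _ => 0
  | _ :: _, [] => 0
  | x :: xs, y :: ys =>
    if x < y then pvMergeCount xs (y :: ys)
    else if y < x then pvMergeCount (x :: xs) ys
    else
      (((x :: xs).takeWhile (fun z => z == x)).length : Int)
        * (((y :: ys).takeWhile (fun z => z == x)).length : Int)
        + pvMergeCount (xs.dropWhile (fun z => z == x))
            (ys.dropWhile (fun z => z == x))
termination_by a.length + b.length
decreasing_by
  all_goals
    first
      | (simp; done)
      | (exact Nat.lt_of_le_of_lt
          (Nat.add_le_add (List.length_dropWhile_le _ _) (List.length_dropWhile_le _ _))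
          (by simp; omega))

def solution_alt (lottos : List Int) (win_nums : List Int) : List Int :=
  let a := PySem.List.sorted lottos (fun x => x) false
  let b := PySem.List.sorted win_nums (fun x => x) false
  let count := pvMergeCount a b
  let count0 := PySem.List.count lottos 0
  [min (7 - count - count0) 6, min (7 - count) 6]

-- ===== PRECONDITION & SPEC =====
def Spec_solution (lottos : List Int) (win_nums : List Int) (out : List Int) : Prop := out = solution_alt lottos win_nums
instance (lottos : List Int) (win_nums : List Int) (out : List Int) : Decidable (Spec_solution lottos win_nums out) := by unfold Spec_solution; infer_instance

-- ===== CLAIM (what is proved, stated in full; the proofs are below) =====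
def Claim_equal_solution : Prop := ∀ (lottos : List Int) (win_nums : List Int), Dom_solution lottos win_nums → Spec_solution lottos win_nums (solution lottos win_nums)

-- ===== LEMMAS AND PROOFS =====

-- A's inner loop adds win_nums.count i to the first component.
theorem pv_inner (i : Int) (w : List Int) (a b : Int) :
    w.foldl (fun (q : Int × Int) j => if i = j then (q.1 + 1, q.2) else q) (a, b)
      = (a + (w.count i : Int), b) := by
  induction w generalizing a with
  | nil => simp
  | cons x xs ih =>
      simp only [List.foldl_cons]
      by_cases h : i = x
      · rw [if_pos h, ih]; simp [h]; ring
      · rw [if_neg h, ih]; simp [Ne.symm h]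

-- A's outer loop computes (Σ counts, number of zeros).
theorem pv_outer (l w : List Int) (c c0 : Int) :
    l.foldl (fun (p : Int × Int) i =>
        let p := if i = 0 then (p.1, p.2 + 1) else p
        w.foldl (fun (q : Int × Int) j => if i = j then (q.1 + 1, q.2) else q) p) (c, c0)
      = (c + (l.map (fun i => (w.count i : Int))).sum, c0 + (l.count 0 : Int)) := by
  induction l generalizing c c0 with
  | nil => simp
  | cons x xs ih =>
      simp only [List.foldl_cons]
      by_cases h : x = 0
      · simp [h, pv_inner, ih, Prod.ext_iff]; constructor <;> ring
      · simp [h, pv_inner, ih, Prod.ext_iff]; ring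

-- In a nondecreasing list bounded below by v, the leading run of v's has length
-- count v, and everything after it is strictly greater than v.
theorem pv_strip (v : Int) (l : List Int) (hl : l.Pairwise (· ≤ ·))
    (hv : ∀ z ∈ l, v ≤ z) :
    ((l.takeWhile (fun z => z == v)).length = l.count v) ∧
      (∀ z ∈ l.dropWhile (fun z => z == v), v < z) := by
  induction l with
  | nil => simp
  | cons h t ih =>
    rcases List.pairwise_cons.mp hl with ⟨hht, ht⟩
    by_cases hh : h = v
    · subst hh
      have hv' : ∀ z ∈ t, h ≤ z := hht
      obtain ⟨ih1, ih2⟩ := ih ht hv'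
      constructor
      · simp [ih1]
      · intro z hz
        rw [List.dropWhile_cons_of_pos (by simp)] at hz
        exact ih2 z hz
    · have hvh : v < h := lt_of_le_of_ne (hv h (by simp)) (Ne.symm hh)
      have hgt : ∀ z ∈ h :: t, v < z := by
        intro z hz
        rcases List.mem_cons.mp hz with rfl | hz
        · exact hvh
        · exact lt_of_lt_of_le hvh (hht z hz)
      constructor
      · rw [List.takeWhile_cons_of_neg (by simp [hh])]
        symm
        simp only [List.length_nil]
        rw [List.count_eq_zero]
        intro hmem
        exact absurd rfl (ne_of_gt (hgt v hmem))
      · rw [List.dropWhile_cons_of_neg (by simp [hh])]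
        exact hgt

-- On two nondecreasing lists the merge-join counts exactly the matching pairs.
theorem pv_merge (a b : List Int)
    (ha : a.Pairwise (· ≤ ·)) (hb : b.Pairwise (· ≤ ·)) :
    pvMergeCount a b = (a.map (fun i => (b.count i : Int))).sum := by
  revert ha hb
  induction a, b using pvMergeCount.induct with
  | case1 b => intro _ _; simp [pvMergeCount]
  | case2 x xs => intro _ _; simp [pvMergeCount]
  | case3 x xs y ys hxy ih =>
    intro ha hb
    rcases List.pairwise_cons.mp ha with ⟨_, ha'⟩
    rcases List.pairwise_cons.mp hb with ⟨hyys, _⟩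
    rw [pvMergeCount, if_pos hxy, ih ha' hb]
    have hx0 : (y :: ys).count x = 0 := by
      rw [List.count_eq_zero]
      intro hmem
      rcases List.mem_cons.mp hmem with rfl | hm
      · omega
      · have := hyys x hm; omega
    simp [hx0]
  | case4 x xs y ys hxy hyx ih =>
    intro ha hb
    rcases List.pairwise_cons.mp hb with ⟨_, hb'⟩
    rcases List.pairwise_cons.mp ha with ⟨hxxs, _⟩
    rw [pvMergeCount, if_neg hxy, if_pos hyx, ih ha hb']
    congr 1
    apply List.map_congr_left
    intro i hi
    have hyi : y < i := by
      rcases List.mem_cons.mp hi with rfl | hm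
      · omega
      · have := hxxs i hm; omega
    rw [List.count_cons_of_ne (by omega)]
  | case5 x xs y ys hxy hyx ih =>
    intro ha hb
    have hxy' : x = y := by omega
    subst hxy'
    have hda : (xs.dropWhile (fun z => z == x)).Pairwise (· ≤ ·) :=
      (List.pairwise_cons.mp ha).2.sublist (List.dropWhile_sublist _)
    have hdb : (ys.dropWhile (fun z => z == x)).Pairwise (· ≤ ·) :=
      (List.pairwise_cons.mp hb).2.sublist (List.dropWhile_sublist _)
    have hva : ∀ z ∈ x :: xs, x ≤ z := by
      intro z hz
      rcases List.mem_cons.mp hz with rfl | hm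
      · exact le_refl _
      · exact (List.pairwise_cons.mp ha).1 z hm
    have hvb : ∀ z ∈ x :: ys, x ≤ z := by
      intro z hz
      rcases List.mem_cons.mp hz with rfl | hm
      · exact le_refl _
      · exact (List.pairwise_cons.mp hb).1 z hm
    obtain ⟨ta_len, da_gt⟩ := pv_strip x (x :: xs) ha hva
    obtain ⟨tb_len, db_gt⟩ := pv_strip x (x :: ys) hb hvb
    rw [pvMergeCount, if_neg hxy, if_neg hyx]
    rw [List.dropWhile_cons_of_pos (by simp)] at da_gt db_gt
    rw [ih hda hdb]
    -- split the right-hand sum along x :: xs = takeWhile ++ dropWhile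
    conv_rhs => rw [← List.takeWhile_append_dropWhile (p := fun z => z == x) (l := x :: xs)]
    rw [List.map_append, List.sum_append]
    -- the run part: every element of the run is x, and count (x::ys) x = run length of b
    have hrun : (((x :: xs).takeWhile (fun z => z == x)).map
          (fun i => (((x :: ys).count i : Int)))).sum
        = (((x :: xs).takeWhile (fun z => z == x)).length : Int)
            * (((x :: ys).takeWhile (fun z => z == x)).length : Int) := by
      have hmc : (((x :: xs).takeWhile (fun z => z == x)).map
            (fun i => (((x :: ys).count i : Int))))
          = (((x :: xs).takeWhile (fun z => z == x)).map
            (fun _ => ((((x :: ys).takeWhile (fun z => z == x)).length : Int)))) := by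
        apply List.map_congr_left
        intro i hi
        have : (i == x) = true := List.mem_takeWhile_imp (p := fun z => z == x) hi
        have hix : i = x := by simpa using this
        rw [hix, ← tb_len]
      rw [hmc, PySem.List.sum_map_const_int]
    -- the tail part: elements after the run exceed x, so they never hit b's run
    have htail : ((xs.dropWhile (fun z => z == x)).map
          (fun i => (((x :: ys).count i : Int)))).sum
        = ((xs.dropWhile (fun z => z == x)).map
          (fun i => (((ys.dropWhile (fun z => z == x)).count i : Int)))).sum := by
      congr 1
      apply List.map_congr_left
      intro i hi
      have hgt : x < i := da_gt i hi
      have hsplit : (x :: ys).count i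
          = ((x :: ys).takeWhile (fun z => z == x)).count i
            + ((x :: ys).dropWhile (fun z => z == x)).count i := by
        conv_lhs => rw [← List.takeWhile_append_dropWhile (p := fun z => z == x) (l := x :: ys)]
        rw [List.count_append]
      have htb0 : ((x :: ys).takeWhile (fun z => z == x)).count i = 0 := by
        rw [List.count_eq_zero]
        intro hmem
        have : (i == x) = true := List.mem_takeWhile_imp (p := fun z => z == x) hmem
        have : i = x := by simpa using this
        omega
      rw [hsplit, htb0, List.dropWhile_cons_of_pos (by simp)]
      simp
    rw [hrun, List.dropWhile_cons_of_pos (p := fun z => z == x) (by simp), htail]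

-- ===== VERDICT (by name: the statement is the Claim_ definition above) =====
theorem solution_spec : Claim_equal_solution := by
  intro lottos win_nums _
  show solution lottos win_nums = solution_alt lottos win_nums
  unfold solution solution_alt
  have hsa : (PySem.List.sorted lottos (fun x => x) false).Pairwise (· ≤ ·) :=
    PySem.List.sorted_pairwise lottos (fun x => x)
  have hsb : (PySem.List.sorted win_nums (fun x => x) false).Pairwise (· ≤ ·) :=
    PySem.List.sorted_pairwise win_nums (fun x => x)
  have hpa := PySem.List.sorted_perm lottos (fun x : Int => x) false
  have hpb := PySem.List.sorted_perm win_nums (fun x : Int => x) false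
  have hsum : ((PySem.List.sorted lottos (fun x => x) false).map
        (fun i => ((PySem.List.sorted win_nums (fun x => x) false).count i : Int))).sum
      = (lottos.map (fun i => (win_nums.count i : Int))).sum := by
    have hmapeq : ((PySem.List.sorted lottos (fun x => x) false).map
          (fun i => ((PySem.List.sorted win_nums (fun x => x) false).count i : Int)))
        = ((PySem.List.sorted lottos (fun x => x) false).map
          (fun i => ((win_nums.count i : Int)))) := by
      apply List.map_congr_left
      intro x _
      rw [hpb.count_eq]
    rw [hmapeq]
    exact (hpa.map _).sum_eq
  simp only [pv_outer, pv_merge _ _ hsa hsb, hsum, PySem.List.count_eq, zero_add]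
  set c : Int := (lottos.map (fun i => ((win_nums.count i : Int)))).sum with hcdef
  set z : Int := (lottos.count 0 : Int) with hzdef
  by_cases h1 : c + z < 2 <;> by_cases h2 : c < 2 <;> simp [h1, h2] <;> omega
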